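-- pv_equiv track=rewrite | github.com/omarisahmed/alphaMiner | AlphaMiner.py | get_direct_follower
-- ===== SOURCE A (Python) =====
-- def get_direct_follower(W):
--     direct_follower = []
--     for i in W:
--         for j in range(0, len(i) - 1):
--             temp = [[i[j]], [i[j + 1]]]
--             if temp not in direct_follower:
--                 direct_follower.append(temp)
--
--     direct_follower.sort(key=lambda x: x[0])
--     return direct_follower
-- ===== SOURCE B (Python) =====
-- def get_direct_follower(W):
--     out = []
--     for trace in W:
--         for a, b in zip(trace, trace[1:]):
--             pair = [[a], [b]]
--             if pair not in out:
--                 k = 0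
--                 while k < len(out) and not pair[0] < out[k][0]:
--                     k += 1
--                 out.insert(k, pair)
--     return out
-- ===== Notes on version B (the rewrite author's own statement) =====
-- stated objective: alternative
-- what changed: B replaces A's collect-all-pairs-then-stable-sort with a single pass that keeps the deduplicated output sorted at all times, inserting each new adjacent pair (taken from zip(trace, trace[1:]) instead of index arithmetic) at its insertion point found by a scan.
import Mathlib
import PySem

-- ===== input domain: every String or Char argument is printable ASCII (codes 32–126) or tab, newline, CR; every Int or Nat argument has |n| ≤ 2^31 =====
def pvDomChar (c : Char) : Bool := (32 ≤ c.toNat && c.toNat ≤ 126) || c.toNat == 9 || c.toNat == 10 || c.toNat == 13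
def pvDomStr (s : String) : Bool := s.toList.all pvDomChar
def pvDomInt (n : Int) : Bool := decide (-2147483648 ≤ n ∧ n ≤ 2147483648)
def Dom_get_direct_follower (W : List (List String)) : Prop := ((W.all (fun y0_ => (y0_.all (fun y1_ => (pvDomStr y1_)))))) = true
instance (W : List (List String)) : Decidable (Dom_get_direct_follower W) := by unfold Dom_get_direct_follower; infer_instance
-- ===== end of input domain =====

-- B replaces A's collect-all-then-stable-sort with a single pass that keeps the output
-- list sorted at all times, inserting each new pair at its insertion point (alternative algorithm: one pass, no final sort).

-- ===== PORT A =====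
-- i[j] / i[j+1] are ported with pyGetD (default ""): j ranges over range(0, len(i)-1), so both
-- indexes are always in range and the default is never used (exact); likewise x[0] in the sort
-- key has x = [[a],[b]] of length 2, so pyGetD x 0 [] is exact.
def get_direct_follower (W : List (List String)) : List (List (List String)) :=
  let direct_follower :=
    W.foldl (fun acc i =>
      (PySem.List.pyRange 0 ((i.length : Int) - 1) 1).foldl (fun acc2 j =>
        let temp := [[PySem.List.pyGetD i j ""], [PySem.List.pyGetD i (j + 1) ""]]
        if temp ∈ acc2 then acc2 else acc2 ++ [temp]) acc) []
  PySem.List.sorted direct_follower (fun x => PySem.List.pyGetD x 0 []) false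

-- ===== PORT B =====
-- pair[0] / out[k][0] are length-≥1 lists here, so pyGetD · 0 [] is exact.
def gdfKey (x : List (List String)) : List String := PySem.List.pyGetD x 0 []

-- the while loop 'k = 0; while k < len(out) and not pair[0] < out[k][0]: k += 1'
def gdfPos (p : List (List String)) : List (List (List String)) → Nat
  | [] => 0
  | y :: ys => if ¬ gdfKey p < gdfKey y then gdfPos p ys + 1 else 0

-- trace[1:] is ported as trace.drop 1 (exact for the slice [1:]).
def get_direct_follower_alt (W : List (List String)) : List (List (List String)) :=
  W.foldl (fun out trace =>
    (trace.zip (trace.drop 1)).foldl (fun out2 ab =>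
      let pair := [[ab.1], [ab.2]]
      if pair ∈ out2 then out2
      else PySem.List.insert out2 ((gdfPos pair out2 : Nat) : Int) pair) out) []

-- ===== PRECONDITION & SPEC =====
def Spec_get_direct_follower (W : List (List String)) (out : List (List (List String))) : Prop := out = get_direct_follower_alt W
instance (W : List (List String)) (out : List (List (List String))) : Decidable (Spec_get_direct_follower W out) := by unfold Spec_get_direct_follower; infer_instance

-- ===== CLAIM (what is proved, stated in full; the proofs are below) =====
def Claim_equal_get_direct_follower : Prop := ∀ (W : List (List String)), Dom_get_direct_follower W → Spec_get_direct_follower W (get_direct_follower W)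

-- ===== LEMMAS AND PROOFS =====

-- insertBy structural equations
theorem insertBy_nil {α : Type} (before : α → α → Bool) (x : α) :
    PySem.List.insertBy before x [] = [x] := by
  simp [PySem.List.insertBy]

theorem insertBy_cons {α : Type} (before : α → α → Bool) (x y : α) (ys : List α) :
    PySem.List.insertBy before x (y :: ys) =
      if before x y then x :: y :: ys else y :: PySem.List.insertBy before x ys := by
  simp [PySem.List.insertBy]

-- gdfPos never exceeds the list length
theorem gdfPos_le (p : List (List String)) (out : List (List (List String))) :
    gdfPos p out ≤ out.length := by
  induction out with
  | nil => simp [gdfPos]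
  | cons y ys ih => simp only [gdfPos]; split <;> simp [ih]

-- B's index-then-insert IS insertBy with the sort's "before" test
theorem insert_gdfPos_eq_insertBy (p : List (List String)) (out : List (List (List String))) :
    PySem.List.insert out ((gdfPos p out : Nat) : Int) p =
      PySem.List.insertBy (fun a b => decide (gdfKey a < gdfKey b)) p out := by
  induction out with
  | nil => simp [gdfPos, insertBy_nil, PySem.List.insert_zero]
  | cons y ys ih =>
    rw [insertBy_cons]
    by_cases h : gdfKey p < gdfKey y
    · simp [gdfPos, h, PySem.List.insert_zero]
    · have hle := gdfPos_le p ys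
      have hb : decide (gdfKey p < gdfKey y) = false := by simpa using h
      simp only [gdfPos, h, not_false_eq_true, if_true]
      rw [PySem.List.insert_natCast _ _ _ (by simp; omega)]
      rw [PySem.List.insert_natCast _ _ _ hle] at ih
      simp only [List.take_succ_cons, List.drop_succ_cons, List.cons_append]
      exact congrArg _ ih

-- appending one element to the input of a stable sort = insertBy into the sorted output
theorem sorted_append_singleton (l : List (List (List String))) (x : List (List String)) :
    PySem.List.sorted (l ++ [x]) gdfKey false =
      PySem.List.insertBy (fun a b => decide (gdfKey a < gdfKey b)) x
        (PySem.List.sorted l gdfKey false) := by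
  rw [PySem.List.sorted_eq_foldl_insertBy, PySem.List.sorted_eq_foldl_insertBy,
      List.foldl_append]
  rfl

-- index-form adjacent pairs, Nat level
theorem pairs_nat (l : List String) :
    (List.range (l.length - 1)).map (fun k => (l.getD k "", l.getD (k+1) "")) =
      l.zip (l.drop 1) := by
  induction l with
  | nil => simp
  | cons x t ih =>
    cases t with
    | nil => simp
    | cons y t' =>
      simp only [List.length_cons, Nat.add_sub_cancel, List.range_succ_eq_map, List.map_cons,
        List.map_map, List.getD_cons_zero, List.getD_cons_succ, List.drop_succ_cons,
        List.drop_zero, List.zip_cons_cons]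
      refine congrArg _ ?_
      simpa [Function.comp, List.getD_cons_succ] using ih

-- the A-side pair stream (indices) IS the B-side pair stream (zip)
theorem pairs_map_eq (l : List String) :
    (PySem.List.pyRange 0 ((l.length : Int) - 1) 1).map
        (fun j => (PySem.List.pyGetD l j "", PySem.List.pyGetD l (j + 1) "")) =
      l.zip (l.drop 1) := by
  rw [PySem.List.pyRange_one, List.map_map]
  have h1 : (((l.length : Int) - 1) - 0).toNat = l.length - 1 := by omega
  rw [h1, ← pairs_nat l]
  refine List.map_congr_left ?_
  intro k hk
  simp only [List.mem_range] at hk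
  have h2 : ((0 : Int) + k) = ((k : Nat) : Int) := by omega
  have h3 : ((k : Nat) : Int) + 1 = (((k + 1 : Nat)) : Int) := by push_cast; ring
  simp only [Function.comp, h2, h3, PySem.List.pyGetD_natCast]

-- fold form of pairs_map_eq, for an arbitrary step
theorem pairs_foldl_eq {β : Type} (l : List String) (g : β → String → String → β) (init : β) :
    (PySem.List.pyRange 0 ((l.length : Int) - 1) 1).foldl
        (fun acc j => g acc (PySem.List.pyGetD l j "") (PySem.List.pyGetD l (j + 1) "")) init =
      (l.zip (l.drop 1)).foldl (fun acc ab => g acc ab.1 ab.2) init := by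
  rw [← pairs_map_eq l, List.foldl_map]

-- core invariant: over any pair stream, B's fold of the sorted acc = sort of A's fold
theorem inner_inv (ps : List (String × String)) (accA : List (List (List String))) :
    ps.foldl (fun out2 ab =>
        if [[ab.1], [ab.2]] ∈ out2 then out2
        else PySem.List.insert out2 ((gdfPos [[ab.1], [ab.2]] out2 : Nat) : Int) [[ab.1], [ab.2]])
      (PySem.List.sorted accA gdfKey false) =
    PySem.List.sorted
      (ps.foldl (fun acc2 ab =>
        if [[ab.1], [ab.2]] ∈ acc2 then acc2 else acc2 ++ [[[ab.1], [ab.2]]]) accA) gdfKey false := by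
  induction ps generalizing accA with
  | nil => rfl
  | cons ab ps ih =>
    simp only [List.foldl_cons]
    by_cases h : [[ab.1], [ab.2]] ∈ accA
    · have h' : [[ab.1], [ab.2]] ∈ PySem.List.sorted accA gdfKey false := by
        rw [PySem.List.mem_sorted]; exact h
      simp only [h, h', if_pos]
      exact ih accA
    · have h' : [[ab.1], [ab.2]] ∉ PySem.List.sorted accA gdfKey false := by
        rw [PySem.List.mem_sorted]; exact h
      simp only [h, h', if_neg, not_false_eq_true]
      rw [insert_gdfPos_eq_insertBy, ← sorted_append_singleton]
      exact ih (accA ++ [[[ab.1], [ab.2]]])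

-- outer loop invariant: B's running output is the sort of A's collected list
theorem outer_inv (W : List (List String)) (accA : List (List (List String))) :
    W.foldl (fun out trace =>
        (trace.zip (trace.drop 1)).foldl (fun out2 ab =>
          if [[ab.1], [ab.2]] ∈ out2 then out2
          else PySem.List.insert out2 ((gdfPos [[ab.1], [ab.2]] out2 : Nat) : Int) [[ab.1], [ab.2]]) out)
      (PySem.List.sorted accA gdfKey false) =
    PySem.List.sorted
      (W.foldl (fun acc i =>
        (PySem.List.pyRange 0 ((i.length : Int) - 1) 1).foldl (fun acc2 j =>
          if [[PySem.List.pyGetD i j ""], [PySem.List.pyGetD i (j + 1) ""]] ∈ acc2 then acc2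
          else acc2 ++ [[[PySem.List.pyGetD i j ""], [PySem.List.pyGetD i (j + 1) ""]]]) acc) accA)
      gdfKey false := by
  induction W generalizing accA with
  | nil => rfl
  | cons i W ih =>
    simp only [List.foldl_cons]
    rw [pairs_foldl_eq i
        (fun acc2 a b => if [[a],[b]] ∈ acc2 then acc2 else acc2 ++ [[[a],[b]]]) accA,
        inner_inv (i.zip (i.drop 1)) accA]
    exact ih _

-- ===== VERDICT (by name: the statement is the Claim_ definition above) =====
theorem get_direct_follower_spec : Claim_equal_get_direct_follower := by
  intro W _
  unfold Spec_get_direct_follower get_direct_follower get_direct_follower_alt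
  exact (outer_inv W []).symm
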